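-- pv_equiv track=rewrite | github.com/NFCM2013/Portfolio | sudoku.py | get_card_length_order
-- ===== SOURCE A (Python) =====
-- def get_card_length_order(card):
--     count = []
--     for i in card:
--         length = len(i)
--         count.append(length)
--     order = []
--     char = 0
--     while len(order) < len(count):
--         for i in range(len(count)):
--             if count[i] == char:
--                 order.append(i)
--         char += 1
--     return order
-- ===== SOURCE B (Python) =====
-- def get_card_length_order(card):
--     buckets = {}
--     for i in range(len(card)):
--         buckets.setdefault(len(card[i]), []).append(i)
--     order = []
--     for length in sorted(buckets):
--         order += buckets[length]
--     return order
-- ===== Notes on version B (the rewrite author's own statement) =====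
-- stated objective: faster
-- what changed: A repeatedly rescans the whole length list once for every candidate length value 0,1,2,... until the output is full; B makes one bucketing pass (dict from length to its indices in order) and then concatenates the buckets over the sorted distinct lengths.
import Mathlib
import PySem

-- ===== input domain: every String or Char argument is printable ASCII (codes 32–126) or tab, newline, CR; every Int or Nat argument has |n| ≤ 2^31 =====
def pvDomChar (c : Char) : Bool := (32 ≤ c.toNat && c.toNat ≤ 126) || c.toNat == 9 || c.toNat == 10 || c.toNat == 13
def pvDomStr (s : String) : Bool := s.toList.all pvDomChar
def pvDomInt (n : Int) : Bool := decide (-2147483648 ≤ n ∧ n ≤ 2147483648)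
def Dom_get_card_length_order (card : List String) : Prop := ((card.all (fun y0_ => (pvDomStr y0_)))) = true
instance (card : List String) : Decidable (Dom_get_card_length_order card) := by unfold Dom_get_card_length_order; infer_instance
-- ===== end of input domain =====

-- B replaces A's rescan-per-candidate-length while-loop by one bucketing pass plus a pass
-- over the sorted distinct lengths (objective: faster; return value only, no mutation).

-- ===== PORT A =====
-- inner 'for i in range(len(count)): if count[i] == char: order.append(i)'
def pvPassA (count : List Int) (char : Int) (order : List Int) : List Int :=
  (PySem.List.pyRange 0 (count.length : Int) 1).foldl
    (fun o i => if PySem.List.pyGetD count i 0 == char then o ++ [i] else o) order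

-- 'while len(order) < len(count): …; char += 1'; the fuel argument only makes the loop total
-- (A's loop stops after at most (sum of the lengths)+1 rounds, see pvLoopA_run below)
def pvLoopA (count : List Int) : Nat → List Int → Int → List Int
  | 0, order, _ => order
  | fuel+1, order, char =>
    if order.length < count.length then
      pvLoopA count fuel (pvPassA count char order) (char + 1)
    else order

def get_card_length_order (card : List String) : List Int :=
  let count := card.foldl (fun acc s => acc ++ [PySem.Str.len s]) []
  pvLoopA count (count.foldl (fun a c => a + c.toNat) 0 + 1) [] 0

-- ===== PORT B =====
-- 'buckets': one pass, dict from length to the list of its indices (in order)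
def pvBucketsB (card : List String) : PySem.Dict Int (List Int) :=
  (PySem.List.pyRange 0 (card.length : Int) 1).foldl
    (fun d i => d.modify (PySem.Str.len (PySem.List.pyGetD card i "")) [] (fun v => v ++ [i]))
    PySem.Dict.empty

def get_card_length_order_alt (card : List String) : List Int :=
  (PySem.List.sorted (pvBucketsB card).keys (fun k => k)).foldl
    (fun order k => order ++ (pvBucketsB card).getD k []) []

-- ===== PRECONDITION & SPEC =====
def Spec_get_card_length_order (card : List String) (out : List Int) : Prop := out = get_card_length_order_alt card
instance (card : List String) (out : List Int) : Decidable (Spec_get_card_length_order card out) := by unfold Spec_get_card_length_order; infer_instance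

-- ===== CLAIM (what is proved, stated in full; the proofs are below) =====
def Claim_equal_get_card_length_order : Prop := ∀ (card : List String), Dom_get_card_length_order card → Spec_get_card_length_order card (get_card_length_order card)

-- ===== LEMMAS AND PROOFS =====

-- indices of count holding value c, in order (the value appended by one round of A's while loop)
def pvP (count : List Int) (c : Int) : List Int :=
  (PySem.List.pyRange 0 (count.length : Int) 1).filter (fun i => PySem.List.pyGetD count i 0 == c)

-- A's order after the rounds char = 0 .. t-1
def pvO (count : List Int) (t : Nat) : List Int :=
  (PySem.List.pyRange 0 (t : Int) 1).flatMap (pvP count)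

theorem pvPassA_eq (count : List Int) (c : Int) (order : List Int) :
    pvPassA count c order = order ++ pvP count c := by
  unfold pvPassA pvP
  rw [PySem.List.foldl_append_if (fun i => PySem.List.pyGetD count i 0 == c) (fun i => i)]
  simp

theorem pvP_length (count : List Int) (c : Int) :
    (pvP count c).length = count.count c := by
  unfold pvP
  rw [← List.countP_eq_length_filter]
  conv_rhs => rw [← PySem.List.map_pyGetD_pyRange_zero' count 0]
  rw [List.count, List.countP_map]
  rfl

theorem pvO_succ (count : List Int) (t : Nat) :
    pvO count (t+1) = pvO count t ++ pvP count (t : Int) := by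
  unfold pvO
  rw [show ((t+1 : Nat) : Int) = (t : Int) + 1 by push_cast; ring,
      PySem.List.pyRange_one_succ_right (by positivity), List.flatMap_append]
  simp

theorem pvCountP_succ (l : List Int) (t : Nat) :
    l.countP (fun x => decide (x < ((t : Int) + 1))) =
      l.countP (fun x => decide (x < (t : Int))) + l.count (t : Int) := by
  induction l with
  | nil => rfl
  | cons x xs ih =>
    simp only [List.countP_cons, List.count_cons, ih]
    by_cases h : x = (t : Int)
    · have h1 : decide ((t:Int) < (t:Int) + 1) = true := by simp
      have h2 : decide ((t:Int) < (t:Int)) = false := by simp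
      subst h; simp only [h1, h2]; simp; omega
    · by_cases h2 : x < (t : Int)
      · have h3 : x < (t:Int) + 1 := by omega
        simp [h, h2, h3]
        omega
      · have h3 : ¬ (x < (t:Int) + 1) := by
          rcases lt_or_ge x ((t:Int)+1) with hl | hg
          · intro _; exact h (by omega)
          · omega
        simp [h, h2, h3]

theorem pvO_length (count : List Int) (hpos : ∀ x ∈ count, 0 ≤ x) (t : Nat) :
    (pvO count t).length = count.countP (fun x => decide (x < (t : Int))) := by
  induction t with
  | zero =>
    unfold pvO
    rw [PySem.List.pyRange_one_eq_nil (by norm_num)]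
    simp only [List.flatMap_nil, List.length_nil]
    symm
    rw [List.countP_eq_zero]
    intro x hx
    simpa using not_lt.mpr (hpos x hx)
  | succ t ih =>
    rw [pvO_succ, List.length_append, ih, pvP_length,
        show ((t+1 : Nat) : Int) = (t : Int) + 1 from by push_cast; ring,
        pvCountP_succ]

theorem pvP_nil (count : List Int) (c : Int) (h : ∀ x ∈ count, x ≠ c) :
    pvP count c = [] := by
  unfold pvP
  rw [List.filter_eq_nil_iff]
  intro i hi
  have hmem : PySem.List.pyGetD count i 0 ∈ count := by
    have h1 : (fun j => PySem.List.pyGetD count j 0) i ∈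
        (PySem.List.pyRange 0 (count.length : Int) 1).map (fun j => PySem.List.pyGetD count j 0) :=
      List.mem_map_of_mem hi
    rwa [PySem.List.map_pyGetD_pyRange_zero'] at h1
  simpa using h _ hmem

theorem pvO_stable (count : List Int) (t : Nat) (h : ∀ x ∈ count, x < (t : Int)) :
    ∀ k, pvO count (t + k) = pvO count t := by
  intro k
  induction k with
  | zero => rfl
  | succ k ih =>
    rw [show t + (k+1) = (t + k) + 1 by omega, pvO_succ, ih,
        pvP_nil count _ (fun x hx => ne_of_lt (by
          have := h x hx; push_cast; omega))]
    simp

theorem pvLoopA_run (count : List Int) (hpos : ∀ x ∈ count, 0 ≤ x) :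
    ∀ (f t : Nat), (∀ x ∈ count, x < (t : Int) + (f : Int)) →
      pvLoopA count f (pvO count t) (t : Int) = pvO count (t + f) := by
  intro f
  induction f with
  | zero => intro t _; rfl
  | succ f ih =>
    intro t hlt
    unfold pvLoopA
    by_cases hg : (pvO count t).length < count.length
    · simp only [hg, if_true]
      rw [pvPassA_eq, ← pvO_succ,
          show (t : Int) + 1 = ((t+1 : Nat) : Int) by push_cast; ring,
          ih (t+1) (fun x hx => by have := hlt x hx; push_cast at *; omega)]
      congr 1
      omega
    · simp only [hg, if_false]
      have hall : ∀ x ∈ count, x < (t : Int) := by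
        rw [pvO_length count hpos] at hg
        have := List.countP_le_length (l := count)
          (p := fun x => decide (x < (t : Int)))
        have heq : count.countP (fun x => decide (x < (t : Int))) = count.length := by
          omega
        intro x hx
        simpa using List.countP_eq_length.1 heq x hx
      exact (pvO_stable count t hall (f+1)).symm

theorem pvSum_bound (count : List Int) :
    ∀ x ∈ count, x.toNat ≤ count.foldl (fun a c => a + c.toNat) 0 := by
  have key : ∀ (l : List Int) (acc : Nat), l.foldl (fun a c => a + c.toNat) acc
      = acc + (l.map Int.toNat).sum := by
    intro l
    induction l with
    | nil => simp
    | cons y ys ih => intro acc; simp [List.foldl_cons, ih, List.sum_cons]; omega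
  intro x hx
  rw [key]
  have : x.toNat ∈ count.map Int.toNat := List.mem_map_of_mem hx
  have := List.le_sum_of_mem this
  omega

-- A equals the canonical rounds-form
theorem pvA_eq (card : List String) :
    get_card_length_order card =
      pvO (card.map PySem.Str.len)
        ((card.map PySem.Str.len).foldl (fun a c => a + c.toNat) 0 + 1) := by
  unfold get_card_length_order
  rw [PySem.List.foldl_append_singleton_eq_map, List.nil_append]
  set count := card.map PySem.Str.len with hc
  have hpos : ∀ x ∈ count, 0 ≤ x := by
    intro x hx
    rw [hc] at hx
    obtain ⟨s, _, rfl⟩ := List.mem_map.1 hx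
    rw [PySem.Str.len_eq]; positivity
  have := pvLoopA_run count hpos (count.foldl (fun a c => a + c.toNat) 0 + 1) 0
    (by
      intro x hx
      have h1 := pvSum_bound count x hx
      have h0 := hpos x hx
      push_cast; omega)
  simpa using this

-- ===== B side =====

theorem pvBucket_getD (card : List String) (c : Int) :
    (pvBucketsB card).getD c [] = pvP (card.map PySem.Str.len) c := by
  have h1 := PySem.Dict.getD_foldl_modify_append
    ((PySem.List.pyRange 0 (card.length : Int) 1).map
      (fun i => (PySem.Str.len (PySem.List.pyGetD card i ""), i)))
    (PySem.Dict.empty) c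
  rw [List.foldl_map
      (f := fun i => (PySem.Str.len (PySem.List.pyGetD card i ""), i))
      (g := fun (d : PySem.Dict Int (List Int)) p => d.modify p.1 [] (fun v => v ++ [p.2]))] at h1
  have h1' : (pvBucketsB card).getD c [] =
      PySem.Dict.empty.getD c [] ++
        List.map (fun x => x.2)
          (List.filter (fun p => p.1 == c)
            ((PySem.List.pyRange 0 (card.length : Int) 1).map
              (fun i => (PySem.Str.len (PySem.List.pyGetD card i ""), i)))) := h1
  rw [h1', PySem.Dict.getD_empty, List.nil_append, List.filter_map, List.map_map]
  have hfc : ∀ i ∈ PySem.List.pyRange 0 (card.length : Int) 1,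
      ((fun (p : Int × Int) => p.1 == c) ∘ (fun i => (PySem.Str.len (PySem.List.pyGetD card i ""), i))) i
        = (fun i => PySem.List.pyGetD (card.map PySem.Str.len) i 0 == c) i := by
    intro i hi
    have hr := (PySem.List.mem_pyRange_one).1 hi
    simp only [Function.comp_apply]
    rw [PySem.List.pyGetD_eq_getElem card "" hr.1 hr.2,
        PySem.List.pyGetD_eq_getElem (card.map PySem.Str.len) 0 hr.1 (by simpa using hr.2)]
    simp
  rw [List.filter_congr hfc]
  unfold pvP
  rw [show ((card.map PySem.Str.len).length : Int) = (card.length : Int) from by simp,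
      show ((fun (x : Int × Int) => x.2) ∘
        (fun i : Int => (PySem.Str.len (PySem.List.pyGetD card i ""), i))) = id from rfl,
      List.map_id]

theorem pvBucket_keys (card : List String) :
    (pvBucketsB card).keys = PySem.Set.ofList (card.map PySem.Str.len) := by
  unfold pvBucketsB
  rw [PySem.Dict.keys_foldl_modify_key (PySem.List.pyRange 0 (card.length : Int) 1)
        (fun i => PySem.Str.len (PySem.List.pyGetD card i "")) []
        (fun _ i => fun v => v ++ [i]) PySem.Dict.empty]
  rw [show (PySem.Dict.empty : PySem.Dict Int (List Int)).keys = [] from rfl,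
      PySem.Set.update_nil_left]
  congr 1
  rw [show (fun i => PySem.Str.len (PySem.List.pyGetD card i ""))
      = (PySem.Str.len ∘ fun i => PySem.List.pyGetD card i "") from rfl,
      ← List.map_map, PySem.List.map_pyGetD_pyRange_zero']

-- dropping values with empty buckets from the round list
theorem pvFlatMap_filter (P : Int → List Int) (S : List Int)
    (h : ∀ c, c ∉ S → P c = []) :
    ∀ (L : List Int), (L.filter (fun c => decide (c ∈ S))).flatMap P = L.flatMap P := by
  intro L
  induction L with
  | nil => rfl
  | cons x xs ih =>
    by_cases hx : x ∈ S
    · simp [hx, ih]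
    · simp [hx, ih, h x hx]

theorem pvB_eq (card : List String) :
    get_card_length_order_alt card =
      pvO (card.map PySem.Str.len)
        ((card.map PySem.Str.len).foldl (fun a c => a + c.toNat) 0 + 1) := by
  unfold get_card_length_order_alt
  set count := card.map PySem.Str.len with hc
  set S := count.foldl (fun a c => a + c.toNat) 0 with hS
  have hpos : ∀ x ∈ count, 0 ≤ x := by
    intro x hx
    rw [hc] at hx
    obtain ⟨s, _, rfl⟩ := List.mem_map.1 hx
    rw [PySem.Str.len_eq]; positivity
  have hkeys : PySem.List.sorted (pvBucketsB card).keys (fun k => k)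
      = (PySem.List.pyRange 0 ((S : Int) + 1) 1).filter (fun c => decide (c ∈ count)) := by
    apply PySem.List.sorted_eq_of_perm_of_pairwise_lt
    · rw [pvBucket_keys, ← hc]
      rw [List.perm_ext_iff_of_nodup (List.Nodup.filter _ (PySem.List.nodup_pyRange_one 0 _))
          (PySem.Set.nodup_ofList count)]
      intro a
      rw [List.mem_filter, PySem.List.mem_pyRange_one, PySem.Set.mem_ofList]
      constructor
      · rintro ⟨-, h⟩; simpa using h
      · intro h
        refine ⟨⟨hpos a h, ?_⟩, by simpa using h⟩
        have h1 := pvSum_bound count a h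
        have h0 := hpos a h
        rw [← hS] at h1
        omega
    · exact List.Pairwise.filter _ (PySem.List.pairwise_lt_pyRange_one 0 _)
  rw [hkeys, PySem.List.foldl_append_eq_flatMap, List.nil_append]
  rw [show (fun k => (pvBucketsB card).getD k []) = pvP count from
      funext (fun c => by rw [pvBucket_getD card c, ← hc])]
  rw [pvFlatMap_filter (pvP count) count
      (fun c hc' => pvP_nil count c (fun x hx => fun he => hc' (he ▸ hx)))]
  unfold pvO
  norm_cast

-- ===== VERDICT (by name: the statement is the Claim_ definition above) =====
theorem get_card_length_order_spec : Claim_equal_get_card_length_order := by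
  intro card _
  unfold Spec_get_card_length_order
  rw [pvA_eq, pvB_eq]
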